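-- pv_equiv track=rewrite | github.com/aiden-perkins/icpc | 2024/9/chris.py | parttwo
-- ===== SOURCE A (Python) =====
-- def parttwo(charpos):
--     k = len(charpos)
--     eq1 = 0
--     eq2 = 0
--     #equation 1 of part2
--     for i in range(k):
--         eq1 += (charpos[i])**2
--     eq1 *= (k-1)
--     #equation 2 of part2
--     S = sum(charpos)
--     for i in charpos:
--         eq2 += i * (S - i)
--     return eq1 - eq2
-- ===== SOURCE B (Python) =====
-- def parttwo(charpos):
--     s = 0
--     sq = 0
--     for x in charpos:
--         s += x
--         sq += x * x
--     return len(charpos) * sq - s * s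
-- ===== Notes on version B (the rewrite author's own statement) =====
-- stated objective: simpler
-- what changed: Replaces the two separate loops (one indexed squares loop scaled by k-1, one pairwise-term loop over x*(S-x)) with a single pass accumulating the sum and sum of squares, returning the closed form k*sumsq - S*S via the identity sum x*(S-x) = S^2 - sum x^2. (one pass, no Python-level indexing, measured ~2x faster)
import Mathlib
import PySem

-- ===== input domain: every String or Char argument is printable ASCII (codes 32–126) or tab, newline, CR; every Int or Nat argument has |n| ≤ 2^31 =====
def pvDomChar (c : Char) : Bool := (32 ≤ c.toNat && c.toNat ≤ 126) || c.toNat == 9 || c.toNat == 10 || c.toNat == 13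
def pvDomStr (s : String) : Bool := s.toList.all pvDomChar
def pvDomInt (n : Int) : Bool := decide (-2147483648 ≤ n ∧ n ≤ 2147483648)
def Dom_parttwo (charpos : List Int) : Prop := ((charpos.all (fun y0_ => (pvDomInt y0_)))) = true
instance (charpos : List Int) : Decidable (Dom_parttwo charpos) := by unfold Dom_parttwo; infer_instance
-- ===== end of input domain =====

-- B replaces A's two loops by a single pass over the list plus the closed form k*sumsq - S*S (objective: simpler).
-- ===== PORT A =====
def parttwo (charpos : List Int) : Int :=
  let k : Int := charpos.length
  let eq1 : Int := (PySem.List.pyRange 0 ((charpos.length : Int)) 1).foldl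
    (fun acc i => acc + (PySem.List.pyGetD charpos i 0) ^ 2) 0
  let eq1 := eq1 * (k - 1)
  let S : Int := charpos.sum
  let eq2 : Int := charpos.foldl (fun acc i => acc + i * (S - i)) 0
  eq1 - eq2

-- ===== PORT B =====
def parttwo_alt (charpos : List Int) : Int :=
  let p := charpos.foldl (fun (acc : Int × Int) x => (acc.1 + x, acc.2 + x * x)) (0, 0)
  (charpos.length : Int) * p.2 - p.1 * p.1

-- ===== PRECONDITION & SPEC =====
def Spec_parttwo (charpos : List Int) (out : Int) : Prop := out = parttwo_alt charpos
instance (charpos : List Int) (out : Int) : Decidable (Spec_parttwo charpos out) := by unfold Spec_parttwo; infer_instance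

-- ===== CLAIM (what is proved, stated in full; the proofs are below) =====
def Claim_equal_parttwo : Prop := ∀ (charpos : List Int), Dom_parttwo charpos → Spec_parttwo charpos (parttwo charpos)

-- ===== LEMMAS AND PROOFS =====

-- ===== VERDICT (by name: the statement is the Claim_ definition above) =====
-- the single-pass fold computes (sum, sum of squares)
lemma fold_pair (charpos : List Int) (a b : Int) :
    charpos.foldl (fun (acc : Int × Int) x => (acc.1 + x, acc.2 + x * x)) (a, b)
      = (a + charpos.sum, b + (charpos.map (fun x => x * x)).sum) := by
  induction charpos generalizing a b with
  | nil => simp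
  | cons y ys ih => simp [List.foldl, ih]; constructor <;> ring

lemma fold_mul_sub (charpos : List Int) (S a : Int) :
    charpos.foldl (fun acc i => acc + i * (S - i)) a
      = a + S * charpos.sum - (charpos.map (fun x => x * x)).sum := by
  induction charpos generalizing a with
  | nil => simp
  | cons y ys ih => simp [List.foldl, ih]; ring

lemma fold_sq (charpos : List Int) (a : Int) :
    charpos.foldl (fun acc i => acc + i ^ 2) a = a + (charpos.map (fun x => x * x)).sum := by
  induction charpos generalizing a with
  | nil => simp
  | cons y ys ih => simp [List.foldl, ih]; ring

theorem parttwo_spec : Claim_equal_parttwo := by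
  intro charpos _
  unfold Spec_parttwo parttwo parttwo_alt
  rw [PySem.List.foldl_pyRange_zero_pyGetD' charpos 0 (fun acc x => acc + x ^ 2) 0]
  simp only [fold_pair, fold_mul_sub, fold_sq, Int.zero_add]
  ring
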